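-- pv_equiv track=rewrite | github.com/cnu-cse-datacom/2-packetcapture-altkddhfcjs | DC_02_02_201402340_KimHyunSeop.py | ByteToBinaryStringinTCP
-- ===== SOURCE A (Python) =====
-- def ByteToBinaryStringinTCP(data):
--     result = list()
--     mask = 1<<11
--     while True:
--         c='1'if(data&mask)!=0else'0'
--         result.append(c)
--         mask>>=1
--         if mask<=0: break
--
--     return result
-- ===== SOURCE B (Python) =====
-- def ByteToBinaryStringinTCP(data):
--     return list(format(data & 0xFFF, '012b'))
-- ===== Notes on version B (the rewrite author's own statement) =====
-- stated objective: idiomatic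
-- what changed: Replace the explicit shifting-mask extraction loop (one iteration per bit) with a single masked value and one zero-padded formatted binary conversion, list(format(data & 0xFFF, '012b')).
import Mathlib
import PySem

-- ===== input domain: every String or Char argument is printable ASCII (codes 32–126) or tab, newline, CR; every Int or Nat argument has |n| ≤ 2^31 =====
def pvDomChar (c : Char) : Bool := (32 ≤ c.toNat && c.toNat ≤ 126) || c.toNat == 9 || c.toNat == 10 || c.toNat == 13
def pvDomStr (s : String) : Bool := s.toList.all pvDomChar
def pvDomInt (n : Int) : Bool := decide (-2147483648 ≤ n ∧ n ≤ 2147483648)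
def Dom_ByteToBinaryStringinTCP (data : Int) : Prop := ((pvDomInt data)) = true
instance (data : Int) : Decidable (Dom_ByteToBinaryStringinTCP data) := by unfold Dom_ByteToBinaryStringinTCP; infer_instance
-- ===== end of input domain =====

-- B replaces A's shifting-mask bit-extraction loop by one masked value and a single
-- zero-padded binary formatting (list(format(data & 0xFFF, '012b'))) — more idiomatic, same result.


-- ===== PORT A =====
-- termination helper for the while loop: mask >>= 1 strictly shrinks a positive mask
theorem pvAShift_lt (mask : Int) (h : ¬ mask >>> (1 : Nat) ≤ 0) :
    (mask >>> (1 : Nat)).toNat < mask.toNat := by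
  cases mask with
  | ofNat m =>
      have he : (Int.ofNat m) >>> (1 : Nat) = Int.ofNat (m >>> 1) := rfl
      have hm2 : m >>> 1 = m / 2 := by
        simp [Nat.shiftRight_succ, Nat.shiftRight_zero]
      rw [he, hm2] at h ⊢
      simp only [Int.ofNat_eq_natCast] at h ⊢
      omega
  | negSucc m =>
      have he : (Int.negSucc m) >>> (1 : Nat) = Int.negSucc (m >>> 1) := rfl
      rw [he] at h
      exact absurd (Int.le_of_lt (Int.negSucc_lt_zero _)) h

-- the 'while True' loop of A: append '1'/'0' for the current mask bit, halve the mask, stop at 0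
def pvALoop (data : Int) (mask : Int) (result : List String) : List String :=
  let c : String := if PySem.Int.band data mask ≠ 0 then "1" else "0"
  let result' := result ++ [c]
  let mask' := mask >>> (1 : Nat)
  if h : mask' ≤ 0 then result' else pvALoop data mask' result'
termination_by mask.toNat
decreasing_by exact pvAShift_lt mask h

def ByteToBinaryStringinTCP (data : Int) : List String :=
  pvALoop data ((1 : Int) <<< 11) []

-- ===== PORT B =====
-- list(format(data & 0xFFF, '012b')): toBinChars = format(·,'b'); '012b' zero-pads to width 12
def ByteToBinaryStringinTCP_alt (data : Int) : List String :=
  let v : Int := PySem.Int.band data 4095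
  let ds : List Char := PySem.Int.toBinChars v
  (List.replicate (12 - ds.length) '0' ++ ds).map String.singleton

-- ===== PRECONDITION & SPEC =====
def Spec_ByteToBinaryStringinTCP (data : Int) (out : List String) : Prop := out = ByteToBinaryStringinTCP_alt data
instance (data : Int) (out : List String) : Decidable (Spec_ByteToBinaryStringinTCP data out) := by unfold Spec_ByteToBinaryStringinTCP; infer_instance

-- ===== CLAIM (what is proved, stated in full; the proofs are below) =====
def Claim_equal_ByteToBinaryStringinTCP : Prop := ∀ (data : Int), Dom_ByteToBinaryStringinTCP data → Spec_ByteToBinaryStringinTCP data (ByteToBinaryStringinTCP data)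

-- ===== LEMMAS AND PROOFS =====

-- the 12 bit characters, most significant first, as a function of the bits
def pvBits (t : Nat → Bool) : List String :=
  (List.range 12).map (fun i => if t (11 - i) then "1" else "0")

-- Nat: ldiff and land partition the bits of the left argument
theorem pv_ldiff_add_land (m : Nat) : ∀ n : Nat, m.ldiff n + (m &&& n) = m := by
  induction m using Nat.binaryRec with
  | zero =>
      intro n
      have h1 : Nat.ldiff 0 n = 0 := by
        apply Nat.eq_of_testBit_eq; intro i; simp [Nat.testBit_ldiff]
      have h2 : 0 &&& n = 0 := by
        apply Nat.eq_of_testBit_eq; intro i; simp [Nat.testBit_land]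
      simp [h1, h2]
  | bit b m ih =>
      intro n
      have hd := Nat.bit_testBit_zero_shiftRight_one n
      calc (Nat.bit b m).ldiff n + (Nat.bit b m &&& n)
          = (Nat.bit b m).ldiff (Nat.bit (n.testBit 0) (n >>> 1)) +
            (Nat.bit b m &&& Nat.bit (n.testBit 0) (n >>> 1)) := by rw [hd]
        _ = Nat.bit (b && !(n.testBit 0)) (m.ldiff (n >>> 1)) +
            Nat.bit (b && n.testBit 0) (m &&& (n >>> 1)) := by
              rw [Nat.ldiff_bit, Nat.land_bit]
        _ = Nat.bit b m := by
              have := ih (n >>> 1)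
              simp only [Nat.bit_val]
              cases b <;> cases n.testBit 0 <;> simp <;> omega

-- PySem's Python-exact band coincides with Mathlib's Int.land
theorem pv_band_eq_land (a b : Int) : PySem.Int.band a b = Int.land a b := by
  cases a with
  | ofNat m =>
      cases b with
      | ofNat n => simp [PySem.Int.band, Int.land]
      | negSucc n =>
          have h : (-(Int.negSucc n) - 1).toNat = n := by
            simp [Int.negSucc_eq]
          have hsub : m - (m &&& n) = m.ldiff n := by
            have := pv_ldiff_add_land m n; omega
          simp [PySem.Int.band, Int.land, h, hsub]
  | negSucc m =>
      have hm : (-(Int.negSucc m) - 1).toNat = m := by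
        simp [Int.negSucc_eq]
      cases b with
      | ofNat n =>
          have hsub : n - (n &&& m) = n.ldiff m := by
            have := pv_ldiff_add_land n m; omega
          simp [PySem.Int.band, Int.land, hm, hsub]
      | negSucc n =>
          have h : (-(Int.negSucc n) - 1).toNat = n := by
            simp [Int.negSucc_eq]
          simp [PySem.Int.band, Int.land, hm, h]
          rw [Int.negSucc_eq]; push_cast; ring

-- land with a power of two isolates one bit
theorem pv_land_two_pow (a : Int) (i : Nat) :
    Int.land a ((2 : Int) ^ i) = if a.testBit i then (2 : Int) ^ i else 0 := by
  have hp : ((2 : Int) ^ i) = Int.ofNat (2 ^ i) := by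
    rw [Int.ofNat_eq_natCast]; push_cast; ring
  cases a with
  | ofNat m =>
      rw [hp]
      simp only [Int.land, Int.testBit]
      rw [Nat.and_two_pow]
      rcases Bool.eq_false_or_eq_true (m.testBit i) with h | h <;> simp [h]
  | negSucc m =>
      rw [hp]
      simp only [Int.land, Int.testBit]
      have : (2 ^ i).ldiff m = if m.testBit i then 0 else 2 ^ i := by
        apply Nat.eq_of_testBit_eq
        intro j
        rw [Nat.testBit_ldiff, Nat.testBit_two_pow]
        by_cases hij : i = j
        · subst hij; cases h : m.testBit i <;> simp [h]
        · cases h : m.testBit i <;> simp [h, hij]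
      rw [this]
      rcases Bool.eq_false_or_eq_true (m.testBit i) with h | h <;> simp [h]

-- A's loop, fully unrolled: the 12 bits of data, most significant first
theorem pvALoop_step (data mask next : Int) (r : List String)
    (hnext : mask >>> (1 : Nat) = next) (hpos : ¬ next ≤ 0) :
    pvALoop data mask r =
      pvALoop data next (r ++ [if PySem.Int.band data mask ≠ 0 then "1" else "0"]) := by
  rw [pvALoop]; simp only [hnext]; rw [dif_neg hpos]

theorem pvALoop_last (data mask : Int) (r : List String) (hz : mask >>> (1 : Nat) ≤ 0) :
    pvALoop data mask r = r ++ [if PySem.Int.band data mask ≠ 0 then "1" else "0"] := by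
  rw [pvALoop]; rw [dif_pos hz]

theorem pvA_eq_bits (data : Int) : ByteToBinaryStringinTCP data = pvBits data.testBit := by
  have hb : ∀ i : Nat, (PySem.Int.band data ((2:Int)^i) ≠ 0) = (data.testBit i = true) := by
    intro i
    rw [pv_band_eq_land, pv_land_two_pow]
    rcases Bool.eq_false_or_eq_true (data.testBit i) with h | h <;> simp [h]
  have h11 := hb 11; have h10 := hb 10; have h9 := hb 9; have h8 := hb 8
  have h7 := hb 7; have h6 := hb 6; have h5 := hb 5; have h4 := hb 4
  have h3 := hb 3; have h2 := hb 2; have h1 := hb 1; have h0 := hb 0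
  norm_num at h11 h10 h9 h8 h7 h6 h5 h4 h3 h2 h1 h0
  unfold ByteToBinaryStringinTCP
  rw [show ((1 : Int) <<< 11) = 2048 by decide]
  rw [pvALoop_step data 2048 1024 _ (by decide) (by decide)]
  rw [pvALoop_step data 1024 512 _ (by decide) (by decide)]
  rw [pvALoop_step data 512 256 _ (by decide) (by decide)]
  rw [pvALoop_step data 256 128 _ (by decide) (by decide)]
  rw [pvALoop_step data 128 64 _ (by decide) (by decide)]
  rw [pvALoop_step data 64 32 _ (by decide) (by decide)]
  rw [pvALoop_step data 32 16 _ (by decide) (by decide)]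
  rw [pvALoop_step data 16 8 _ (by decide) (by decide)]
  rw [pvALoop_step data 8 4 _ (by decide) (by decide)]
  rw [pvALoop_step data 4 2 _ (by decide) (by decide)]
  rw [pvALoop_step data 2 1 _ (by decide) (by decide)]
  rw [pvALoop_last data 1 _ (by decide)]
  simp only [h11, h10, h9, h8, h7, h6, h5, h4, h3, h2, h1, h0]
  norm_num [pvBits, List.range_succ]

-- B on a value below 2^12: the padded binary digits are exactly the 12 bits (finite check)
-- MSB-first binary digits (the recursion Nat.toDigitsCore performs, without fuel)
def pvBin (n : Nat) : List Char :=
  if _h : n < 2 then [Nat.digitChar n] else pvBin (n / 2) ++ [Nat.digitChar (n % 2)]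
decreasing_by exact Nat.div_lt_self (by omega) (by omega)

theorem pv_toDigitsCore_eq (f : Nat) : ∀ (n : Nat) (l : List Char), n < f →
    Nat.toDigitsCore 2 f n l = pvBin n ++ l := by
  induction f with
  | zero => intro n l h; omega
  | succ f ih =>
      intro n l h
      rw [Nat.toDigitsCore]
      by_cases h2 : n / 2 = 0
      · have hn : n < 2 := by omega
        rw [pvBin]
        simp only [h2, if_pos, hn, dif_pos]
        have : n % 2 = n := by omega
        simp [this]
      · have hn : ¬ n < 2 := by omega
        simp only [h2, if_false]
        rw [ih (n / 2) _ (by omega)]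
        conv_rhs => rw [pvBin]
        rw [dif_neg hn]
        simp

theorem pv_toDigits_eq (n : Nat) : Nat.toDigits 2 n = pvBin n :=
  (pv_toDigitsCore_eq (n + 1) n [] (by omega)).trans (by simp)

theorem pv_digitChar_bit (n : Nat) :
    Nat.digitChar (n % 2) = if n.testBit 0 then '1' else '0' := by
  rcases Nat.mod_two_eq_zero_or_one n with h | h <;>
    simp [h, Nat.digitChar, Nat.testBit_zero]

-- zero-padding pvBin n to width k yields exactly the k bits of n, most significant first
theorem pv_padded (k : Nat) : ∀ n : Nat, n < 2 ^ k → 0 < k →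
    List.replicate (k - (pvBin n).length) '0' ++ pvBin n =
      (List.range k).map (fun i => if n.testBit (k - 1 - i) then '1' else '0') := by
  induction k with
  | zero => intro n _ h; omega
  | succ k ih =>
      intro n hn _
      rw [List.range_succ, List.map_append]
      simp only [Nat.add_sub_cancel]
      by_cases hsmall : n < 2
      · rw [pvBin, dif_pos hsmall]
        have hmap : ∀ x ∈ List.map (fun i => if n.testBit (k - i) then '1' else '0') (List.range k), x = '0' := by
          intro x hx
          rcases List.mem_map.mp hx with ⟨i, hi, rfl⟩
          have hik : i < k := List.mem_range.mp hi
          have hb : n.testBit (k - i) = false := by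
            apply Nat.testBit_lt_two_pow
            calc n < 2 ^ 1 := by omega
            _ ≤ 2 ^ (k - i) := Nat.pow_le_pow_right (by omega) (by omega)
          simp [hb]
        rw [List.eq_replicate_of_mem hmap]
        have hnn : n % 2 = n := by omega
        simp only [List.length_map, List.length_range, List.length_singleton,
          List.map_cons, List.map_nil, Nat.sub_self]
        rw [← hnn, pv_digitChar_bit]
        simp [hnn]
      · rw [pvBin, dif_neg hsmall]
        have hdiv : n / 2 < 2 ^ k := by
          have h2 : (2:Nat) ^ (k + 1) = 2 * 2 ^ k := by ring
          omega
        have hk : 0 < k := by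
          by_contra hk0
          have : k = 0 := by omega
          subst this
          simp at hn; omega
        have IH := ih (n / 2) hdiv hk
        have hlen : (List.replicate (k + 1 - ((pvBin (n / 2)).length + 1)) '0') =
            (List.replicate (k - (pvBin (n / 2)).length) '0') := by
          congr 1; omega
        rw [List.length_append, List.length_singleton, ← List.append_assoc, hlen, IH]
        congr 1
        · apply List.map_congr_left
          intro i hi
          have hik : i < k := List.mem_range.mp hi
          rw [Nat.testBit_div_two]
          have he : k - 1 - i + 1 = k - i := by omega
          rw [he]
        · simp only [List.map_cons, List.map_nil, Nat.sub_self]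
          rw [pv_digitChar_bit]

-- data & 0xFFF is a natural number below 4096
theorem pv_land_mask (data : Int) :
    ∃ m : Nat, Int.land data 4095 = (m : Int) ∧ m < 4096 := by
  cases data with
  | ofNat m =>
      refine ⟨m &&& 4095, rfl, ?_⟩
      have := Nat.and_le_right (n := m) (m := 4095); omega
  | negSucc m =>
      refine ⟨Nat.ldiff 4095 m, rfl, ?_⟩
      have := pv_ldiff_add_land 4095 m
      omega

-- B, reduced to the 12 bits of data & 0xFFF
theorem pvB_eq_bits (data : Int) :
    ByteToBinaryStringinTCP_alt data = pvBits (Int.land data 4095).toNat.testBit := by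
  obtain ⟨m, hm, hlt⟩ := pv_land_mask data
  unfold ByteToBinaryStringinTCP_alt
  rw [pv_band_eq_land, hm]
  have h1 : PySem.Int.toBinChars (m : Int) = pvBin m := by
    unfold PySem.Int.toBinChars
    rw [if_neg (by omega)]
    simp [pv_toDigits_eq]
  simp only [h1, Int.toNat_natCast]
  rw [pv_padded 12 m (by omega) (by omega)]
  unfold pvBits
  rw [List.map_map]
  apply List.map_congr_left
  intro i _
  simp only [Function.comp]
  rcases Bool.eq_false_or_eq_true (m.testBit (12 - 1 - i)) with h | h <;>
    simp [h, String.singleton]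

-- masking with 0xFFF keeps the low 12 bits
theorem pv_bits_agree (data : Int) (j : Nat) (hj : j < 12) :
    (Int.land data 4095).toNat.testBit j = data.testBit j := by
  obtain ⟨m, hm, _⟩ := pv_land_mask data
  rw [hm, Int.toNat_natCast]
  have h2 : ((m : Int)).testBit j = m.testBit j := rfl
  have h3 : ((4095 : Int)).testBit j = Nat.testBit 4095 j := rfl
  have h4 : Nat.testBit 4095 j = true := by
    have he : (4095 : Nat) = 2 ^ 12 - 1 := by norm_num
    rw [he, Nat.testBit_two_pow_sub_one]; simp [hj]
  have hl := Int.testBit_land data 4095 j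
  rw [← hm] at h2
  rw [h2, h3, h4] at hl
  simpa using hl

-- ===== VERDICT (by name: the statement is the Claim_ definition above) =====
theorem ByteToBinaryStringinTCP_spec : Claim_equal_ByteToBinaryStringinTCP := by
  intro data _
  unfold Spec_ByteToBinaryStringinTCP
  rw [pvA_eq_bits, pvB_eq_bits]
  unfold pvBits
  apply List.map_congr_left
  intro i hi
  have hik : i < 12 := List.mem_range.mp hi
  rw [pv_bits_agree data (11 - i) (by omega)]
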